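-- pv_equiv track=rewrite | github.com/JayDew/sunscreen_interview | main.py | hungry_rabbit
-- ===== SOURCE A (Python) =====
-- def hungry_rabbit_util(garden, row, col):
--     """
--     This recursive method returns the number of carrots along a valid path
--     that the rabbit can eat following the 'immediate' highest value path:
--     at each iteration, the rabbit chooses to move in the direction that
--     maximizes the immediate profit.
--     :param garden: N x M matrix
--     :param row: current row
--     :param col: current column
--     :return: number of carrots eaten following the 'immediate' highest value path
--     """
--     max = 0
--     next_row = None
--     next_col = None
--
--     for r, c in [[-1, 0], [1, 0], [0, -1], [0, 1]]:
--         if row + r >= 0 and row + r < len(garden) and \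
--                 col + c >= 0 and col + c < len(garden[row]):
--             if garden[row + r][col + c] > max:
--                 max = garden[row + r][col + c]
--                 next_row = row + r
--                 next_col = col + c
--
--     carrots = garden[row][col]
--     garden[row][col] = 0  # the rabbit consumes the carrot, prevents infinite loops
--
--     if max > 0 and next_row is not None and next_col is not None:
--         carrots += hungry_rabbit_util(garden, next_row, next_col)
--
--     return carrots
--
-- def find_center(garden):
--     """
--     Finds the center, or the highest number closest to it, in the garden matrix.
--     :param garden: N x M matrix
--     :return: coordinates of the best starting point
--     """
--     row_options = [len(garden) // 2, len(garden) // 2]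
--     col_options = [len(garden[0]) // 2, len(garden[0]) // 2]
--
--     # Adjust options if the matrix dimensions are even
--     if len(garden) % 2 == 0:
--         row_options[0] -= 1
--
--     if len(garden[0]) % 2 == 0:
--         col_options[0] -= 1
--
--     max = 0
--     row = None
--     col = None
--
--     for r_option in row_options:
--         for c_option in col_options:
--             if garden[r_option][c_option] > max:
--                 max = garden[r_option][c_option]
--                 row = r_option
--                 col = c_option
--
--     return row, col
--
-- def hungry_rabbit(garden):
--     """
--     Solve the hungry rabbit problem.
--     :param garden: rectangular N x M 2D matrix with positive values
--     :return:  number of carrots eaten by the rabbit choosing the square that has the most carrots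
--     """
--     if len(garden) == 0 or len(garden[0]) == 0:
--         return 0
--
--     # create a copy of the garden
--     copy = [g_row[:] for g_row in garden]
--     row, col = find_center(copy)
--
--     if row is None or col is None:
--         return 0
--
--     return hungry_rabbit_util(copy, row, col)
-- ===== SOURCE B (Python) =====
-- def _pick(cands, value):
--     """First candidate achieving the (strictly positive) maximum value, else None."""
--     best = max((value(p) for p in cands), default=0)
--     if best <= 0:
--         return None
--     return next(p for p in cands if value(p) == best)
--
--
-- def hungry_rabbit(garden):
--     """Iterative greedy walk over the ORIGINAL garden with a visited set:
--     eaten cells count as 0, no copy is mutated."""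
--     if len(garden) == 0 or len(garden[0]) == 0:
--         return 0
--     n, m = len(garden), len(garden[0])
--     rows = [n // 2 - 1, n // 2] if n % 2 == 0 else [n // 2]
--     cols = [m // 2 - 1, m // 2] if m % 2 == 0 else [m // 2]
--     pos = _pick([(r, c) for r in rows for c in cols],
--                 lambda p: garden[p[0]][p[1]])
--     visited = set()
--     total = 0
--     while pos is not None:
--         row, col = pos
--         total += garden[row][col]
--         visited.add(pos)
--         cands = [(row + dr, col + dc)
--                  for dr, dc in ((-1, 0), (1, 0), (0, -1), (0, 1))
--                  if 0 <= row + dr < n and 0 <= col + dc < m]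
--         pos = _pick(cands, lambda p: 0 if p in visited else garden[p[0]][p[1]])
--     return total
-- ===== Notes on version B (the rewrite author's own statement) =====
-- stated objective: alternative
-- what changed: B replaces A's recursive eat-and-zero descent over a mutated copy by an iterative walk over the original garden with a visited set (eaten cells count 0), and replaces both running strict-> folds (center choice and neighbor choice) by building a candidate list and taking max(values, default=0) plus the first candidate achieving it.
-- outside the precondition, e.g. on hungry_rabbit([[1, 0, 5], [4, 5, 0, 0], [1, 4, 2, 2]]): A returns 13, B returns 11; on hungry_rabbit([[2, 7], [5]]): A raises IndexError, B raises IndexError; on hungry_rabbit([[3], [5, 0], [3]]): A returns 8, B returns 8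
import Mathlib
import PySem

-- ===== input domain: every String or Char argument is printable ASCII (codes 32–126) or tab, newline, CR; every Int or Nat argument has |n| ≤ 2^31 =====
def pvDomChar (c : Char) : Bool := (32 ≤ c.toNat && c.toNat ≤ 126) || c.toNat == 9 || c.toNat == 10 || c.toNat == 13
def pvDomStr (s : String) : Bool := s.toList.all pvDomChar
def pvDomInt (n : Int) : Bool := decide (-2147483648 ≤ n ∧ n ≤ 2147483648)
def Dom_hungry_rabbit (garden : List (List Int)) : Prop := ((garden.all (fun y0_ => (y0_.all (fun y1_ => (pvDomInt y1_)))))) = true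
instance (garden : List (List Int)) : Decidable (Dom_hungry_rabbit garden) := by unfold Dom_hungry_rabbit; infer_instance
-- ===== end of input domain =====

-- B replaces A's recursive eat-and-zero descent over a mutated copy by an
-- iterative walk over the ORIGINAL garden with a visited set, choosing each
-- step from a candidate list by max(values, default=0) and first achiever
-- (objective: alternative decomposition, same cost).

-- ===== PORT A =====
-- pvRow g i = garden[i] (empty list as default: call sites have checked the
-- index, or short-circuit makes the value irrelevant); pvCell likewise a
-- checked garden[r][c]; pvZero = `garden[r][c] = 0` for the in-range
-- nonnegative r, c at which A performs it.
def pvRow (g : List (List Int)) (i : Int) : List Int := (PySem.List.pyGet? g i).getD []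
def pvCell (g : List (List Int)) (r c : Int) : Int := (PySem.List.pyGet? (pvRow g r) c).getD 0
def pvZero (g : List (List Int)) (r c : Int) : List (List Int) :=
  g.set r.toNat ((pvRow g r).set c.toNat 0)
-- Fuel for A's recursion: the walk visits each cell at most once (a cell is
-- zeroed when eaten and only strictly positive cells are entered), so
-- (number of cells) + 2 steps always suffice.
def pvFuel (g : List (List Int)) : Nat := g.foldl (fun a r => a + r.length) 0 + 2

-- the `for r, c in [[-1,0],[1,0],[0,-1],[0,1]]` scan of hungry_rabbit_util:
-- state (max, next_row, next_col)
def pvScanA (g : List (List Int)) (row col : Int) : Int × Option Int × Option Int :=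
  [((-1 : Int), (0 : Int)), (1, 0), (0, -1), (0, 1)].foldl
    (fun s rc =>
      if row + rc.1 ≥ 0 ∧ row + rc.1 < (g.length : Int) ∧
         col + rc.2 ≥ 0 ∧ col + rc.2 < ((pvRow g row).length : Int) then
        if pvCell g (row + rc.1) (col + rc.2) > s.1 then
          (pvCell g (row + rc.1) (col + rc.2), some (row + rc.1), some (col + rc.2))
        else s
      else s)
    (0, none, none)

def hungry_rabbit_util : Nat → List (List Int) → Int → Int → Int
  | 0, _, _, _ => 0          -- fuel exhausted: unreachable (see pvFuel)
  | fuel + 1, g, row, col =>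
    let s := pvScanA g row col
    let carrots := pvCell g row col
    let g' := pvZero g row col
    if s.1 > 0 ∧ s.2.1.isSome ∧ s.2.2.isSome then
      carrots + hungry_rabbit_util fuel g' (s.2.1.getD 0) (s.2.2.getD 0)
    else carrots

def find_center (g : List (List Int)) : Option Int × Option Int :=
  let n : Int := g.length
  let m : Int := (pvRow g 0).length
  -- [n//2, n//2] with options[0] -= 1 when the dimension is even
  let row_options : List Int :=
    if PySem.Int.mod n 2 = 0 then [PySem.Int.floordiv n 2 - 1, PySem.Int.floordiv n 2]
    else [PySem.Int.floordiv n 2, PySem.Int.floordiv n 2]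
  let col_options : List Int :=
    if PySem.Int.mod m 2 = 0 then [PySem.Int.floordiv m 2 - 1, PySem.Int.floordiv m 2]
    else [PySem.Int.floordiv m 2, PySem.Int.floordiv m 2]
  let s := row_options.foldl (fun s r =>
      col_options.foldl (fun s c =>
        if pvCell g r c > s.1 then (pvCell g r c, some r, some c) else s) s)
    ((0 : Int), (none : Option Int), (none : Option Int))
  (s.2.1, s.2.2)

def hungry_rabbit (garden : List (List Int)) : Int :=
  -- `len(garden) == 0 or len(garden[0]) == 0` (short-circuit: pvRow's default
  -- [] has length 0, which is exactly the branch Python takes on [])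
  if garden.length = 0 ∨ (pvRow garden 0).length = 0 then 0
  else
    let copy := garden.map (fun g_row => g_row)   -- [g_row[:] for g_row in garden]
    let rc := find_center copy
    if rc.1 = none ∨ rc.2 = none then 0
    else hungry_rabbit_util (pvFuel copy) copy (rc.1.getD 0) (rc.2.getD 0)

-- ===== PORT B =====
-- garden[p[0]][p[1]] for the nonnegative checked indices B uses (default 0
-- out of range, where B's callers never read it)
def pvCellB (g : List (List Int)) (p : Int × Int) : Int :=
  (g.getD p.1.toNat []).getD p.2.toNat 0

-- _pick(cands, value): max(values, default=0), then first achiever if > 0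
def pvPick (cands : List (Int × Int)) (value : Int × Int → Int) : Option (Int × Int) :=
  let best := (PySem.List.max? (cands.map value) (fun v => v)).getD 0
  if best ≤ 0 then none
  else cands.find? (fun p => value p == best)

-- the candidate comprehension [(row+dr, col+dc) for dr,dc in … if in bounds]
def pvCandsB (n m row col : Int) : List (Int × Int) :=
  [((-1 : Int), (0 : Int)), (1, 0), (0, -1), (0, 1)].filterMap (fun d =>
    if 0 ≤ row + d.1 ∧ row + d.1 < n ∧ 0 ≤ col + d.2 ∧ col + d.2 < m then
      some (row + d.1, col + d.2)
    else none)

-- the `while pos is not None` loop; fuel bounds the visits (each iteration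
-- marks a fresh cell visited, so (number of cells) + 2 steps suffice)
def pvWalkB (g : List (List Int)) (n m : Int) :
    Nat → PySem.Set (Int × Int) → Option (Int × Int) → Int → Int
  | 0, _, _, total => total      -- fuel exhausted: unreachable
  | fuel + 1, visited, pos, total =>
    match pos with
    | none => total
    | some p =>
      let total' := total + pvCellB g p
      let visited' := PySem.Set.add visited p
      pvWalkB g n m fuel visited'
        (pvPick (pvCandsB n m p.1 p.2)
          (fun q => if PySem.Set.contains visited' q then 0 else pvCellB g q))
        total'

def pvFuelB (g : List (List Int)) : Nat := g.length * (g.headI).length + 2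

-- the start choice: _pick over the centre candidate grid
def pvStart (garden : List (List Int)) : Option (Int × Int) :=
  let n : Int := garden.length
  let m : Int := (garden.headI).length
  let rows : List Int :=
    if PySem.Int.mod n 2 = 0 then [PySem.Int.floordiv n 2 - 1, PySem.Int.floordiv n 2]
    else [PySem.Int.floordiv n 2]
  let cols : List Int :=
    if PySem.Int.mod m 2 = 0 then [PySem.Int.floordiv m 2 - 1, PySem.Int.floordiv m 2]
    else [PySem.Int.floordiv m 2]
  pvPick (rows.flatMap (fun r => cols.map (fun c => (r, c)))) (pvCellB garden)

def hungry_rabbit_alt (garden : List (List Int)) : Int :=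
  if garden.length = 0 ∨ (garden.headI).length = 0 then 0
  else
    pvWalkB garden (garden.length : Int) ((garden.headI).length : Int)
      (pvFuelB garden) (PySem.Set.ofList []) (pvStart garden) 0

-- ===== PRECONDITION & SPEC =====
-- Pre_ excludes ragged (non-rectangular) gardens that the empty guard does not
-- dismiss: A's bounds checks use len(garden[0]) / len(garden[row]) for OTHER
-- rows, so on ragged input A often raises IndexError, and where it happens to
-- return, the value is an accident of which short rows the greedy path touches.
def Pre_hungry_rabbit (garden : List (List Int)) : Prop :=
  garden.length = 0 ∨ (garden.headI).length = 0 ∨ ∀ r ∈ garden, r.length = (garden.headI).length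
instance (garden : List (List Int)) : Decidable (Pre_hungry_rabbit garden) := by
  unfold Pre_hungry_rabbit; infer_instance

def pvWitness_hungry_rabbit : List (List Int) := [[1, 2], [3, 4]]

def Spec_hungry_rabbit (garden : List (List Int)) (out : Int) : Prop := out = hungry_rabbit_alt garden
instance (garden : List (List Int)) (out : Int) : Decidable (Spec_hungry_rabbit garden out) := by unfold Spec_hungry_rabbit; infer_instance

-- ===== CLAIM (what is proved, stated in full; the proofs are below) =====
def Claim_equal_hungry_rabbit : Prop := ∀ (garden : List (List Int)), Dom_hungry_rabbit garden → Pre_hungry_rabbit garden → Spec_hungry_rabbit garden (hungry_rabbit garden)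

-- ===== LEMMAS AND PROOFS =====

-- the strict-> running-best step A's two scans perform, as a named function
def pvStepA (f : Int × Int → Int) (s : Int × Option Int × Option Int) (q : Int × Int) :
    Int × Option Int × Option Int :=
  if f q > s.1 then (f q, some q.1, some q.2) else s

theorem pvCellB_eq_pvCell (g : List (List Int)) (r c : Int) (hr : 0 ≤ r) (hc : 0 ≤ c) :
    pvCell g r c = pvCellB g (r, c) := by
  unfold pvCell pvRow pvCellB
  rw [PySem.List.pyGet?_of_nonneg _ hr, PySem.List.pyGet?_of_nonneg _ hc]
  simp [List.getD_eq_getElem?_getD]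
theorem pvStepA_idem (f : Int × Int → Int) (s : Int × Option Int × Option Int) (q : Int × Int) :
    pvStepA f (pvStepA f s q) q = pvStepA f s q := by
  unfold pvStepA; split_ifs <;> simp_all

theorem pvFold_congr (f f' : Int × Int → Int) :
    ∀ (L : List (Int × Int)) (s : Int × Option Int × Option Int),
    (∀ q ∈ L, f q = f' q) → L.foldl (pvStepA f) s = L.foldl (pvStepA f') s := by
  intro L
  induction L with
  | nil => intro s _; rfl
  | cons q T ih =>
    intro s h
    simp only [List.foldl_cons]
    rw [show pvStepA f s q = pvStepA f' s q by
        unfold pvStepA; rw [h q List.mem_cons_self]]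
    exact ih _ (fun p hp => h p (List.mem_cons_of_mem q hp))

theorem pvFold_noop (f : Int × Int → Int) :
    ∀ (L : List (Int × Int)) (s : Int × Option Int × Option Int),
    (∀ q ∈ L, f q ≤ s.1) → L.foldl (pvStepA f) s = s := by
  intro L
  induction L with
  | nil => intro s _; rfl
  | cons q T ih =>
    intro s h
    simp only [List.foldl_cons]
    rw [show pvStepA f s q = s by
        unfold pvStepA; rw [if_neg (by have := h q List.mem_cons_self; omega)]]
    exact ih _ (fun p hp => h p (List.mem_cons_of_mem q hp))

-- characterisation of the strict-> fold: final best is the running max, the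
-- recorded position is the first achiever (when it exceeds the start value)
theorem pvFoldA_char (f : Int × Int → Int) :
    ∀ (L : List (Int × Int)) (a : Int) (o : Option Int × Option Int),
    (L.foldl (pvStepA f) (a, o)).1 = (L.map f).foldl max a
    ∧ ((L.map f).foldl max a = a → (L.foldl (pvStepA f) (a, o)).2 = o)
    ∧ (a < (L.map f).foldl max a →
        ∃ q, L.find? (fun p => f p == (L.map f).foldl max a) = some q
          ∧ (L.foldl (pvStepA f) (a, o)).2 = (some q.1, some q.2)) := by
  intro L
  induction L with
  | nil => intro a o; refine ⟨rfl, fun _ => rfl, fun h => absurd h (by simp)⟩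
  | cons p T ih =>
    intro a o
    simp only [List.map_cons, List.foldl_cons]
    have hle := (PySem.List.le_foldl_max (T.map f) (max a (f p))).1
    by_cases hgt : f p > a
    · rw [show pvStepA f (a, o) p = (f p, some p.1, some p.2) from by
        unfold pvStepA; rw [if_pos hgt]]
      rw [show max a (f p) = f p from by omega]
      obtain ⟨ih1, ih2, ih3⟩ := ih (f p) (some p.1, some p.2)
      have hle' := (PySem.List.le_foldl_max (T.map f) (f p)).1
      refine ⟨ih1, fun h => absurd h (by omega), fun _ => ?_⟩
      by_cases heq : (T.map f).foldl max (f p) = f p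
      · refine ⟨p, ?_, ?_⟩
        · rw [List.find?_cons_of_pos (by simp [heq])]
        · rw [ih2 heq]
      · obtain ⟨q, hq1, hq2⟩ := ih3 (by omega)
        refine ⟨q, ?_, hq2⟩
        rw [List.find?_cons_of_neg (by simp; omega)]
        exact hq1
    · rw [show pvStepA f (a, o) p = (a, o) from by
        unfold pvStepA; rw [if_neg hgt]]
      rw [show max a (f p) = a from by omega]
      obtain ⟨ih1, ih2, ih3⟩ := ih a o
      refine ⟨ih1, ih2, fun hlt => ?_⟩
      obtain ⟨q, hq1, hq2⟩ := ih3 hlt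
      refine ⟨q, ?_, hq2⟩
      rw [List.find?_cons_of_neg (by simp; omega)]
      exact hq1
-- pvPick vs the strict-> fold from (0, none, none)
theorem pvMax_shift : ∀ (t : List Int) (a b : Int),
    t.foldl max (max a b) = max a (t.foldl max b) := by
  intro t
  induction t with
  | nil => intro a b; rfl
  | cons x t ih =>
    intro a b
    simp only [List.foldl_cons]
    rw [show max (max a b) x = max a (max b x) from by omega, ih]

theorem pvPick_char (f : Int × Int → Int) (L : List (Int × Int)) :
    (pvPick L f = none → (L.foldl (pvStepA f) (0, none, none)).2 = (none, none))
    ∧ (∀ q, pvPick L f = some q →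
        L.foldl (pvStepA f) (0, none, none) = (f q, some q.1, some q.2)
        ∧ 0 < f q ∧ q ∈ L) := by
  obtain ⟨h1, h2, h3⟩ := pvFoldA_char f L 0 (none, none)
  cases L with
  | nil =>
    refine ⟨fun _ => rfl, fun q hq => absurd hq (by simp [pvPick, PySem.List.max?])⟩
  | cons p T =>
    have hmax : PySem.List.max? ((p :: T).map f) (fun v => v)
        = some ((T.map f).foldl max (f p)) := by
      simp only [List.map_cons]
      exact PySem.List.max?_id_cons (f p) (T.map f)
    have hM : ((p :: T).map f).foldl max 0 = max 0 ((T.map f).foldl max (f p)) := by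
      simp only [List.map_cons, List.foldl_cons]
      exact pvMax_shift _ 0 (f p)
    unfold pvPick
    rw [hmax]
    simp only [Option.getD_some]
    set B := (T.map f).foldl max (f p) with hB
    by_cases hb : B ≤ 0
    · rw [if_pos hb]
      have h0 : ((p :: T).map f).foldl max 0 = 0 := by omega
      exact ⟨fun _ => h2 h0, fun q hq => by simp at hq⟩
    · rw [if_neg hb]
      have hM' : ((p :: T).map f).foldl max 0 = B := by omega
      obtain ⟨q, hq1, hq2⟩ := h3 (by omega)
      rw [hM'] at hq1
      constructor
      · intro hc
        rw [hq1] at hc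
        simp at hc
      · intro q' hq'
        rw [hq1, Option.some_inj] at hq'
        subst hq'
        have hfq : f q = B := by simpa using List.find?_some hq1
        refine ⟨?_, by omega, List.mem_of_find?_eq_some hq1⟩
        rw [Prod.ext_iff]
        exact ⟨by rw [h1, hM', hfq], hq2⟩
-- membership in the candidate list
theorem pvCandsB_mem (n m row col : Int) (q : Int × Int) (h : q ∈ pvCandsB n m row col) :
    0 ≤ q.1 ∧ q.1 < n ∧ 0 ≤ q.2 ∧ q.2 < m ∧ q ≠ (row, col) := by
  unfold pvCandsB at h
  simp only [List.mem_filterMap, List.mem_cons, List.not_mem_nil, or_false] at h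
  obtain ⟨d, hd, hq⟩ := h
  rcases hd with h | h | h | h <;> subst h <;> revert hq <;> split_ifs with hb <;> intro hq <;>
    first
    | exact Option.noConfusion hq
    | exact hq.elim
    | (rw [Option.some_inj] at hq; subst hq; obtain ⟨hb1, hb2, hb3, hb4⟩ := hb;
       refine ⟨by simp; omega, by simp; omega, by simp; omega, by simp; omega, ?_⟩;
       intro he; rw [Prod.ext_iff] at he; simp at he)
-- A's neighbour scan as a fold of pvStepA over B's candidate list
theorem pvFoldA_filterMap (g' : List (List Int)) (row col n m : Int) :
    ∀ (offs : List (Int × Int)) (s : Int × Option Int × Option Int),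
    (offs.filterMap (fun d =>
        if 0 ≤ row + d.1 ∧ row + d.1 < n ∧ 0 ≤ col + d.2 ∧ col + d.2 < m then
          some (row + d.1, col + d.2)
        else none)).foldl (pvStepA (fun q => pvCell g' q.1 q.2)) s
    = offs.foldl (fun s d =>
        if 0 ≤ row + d.1 ∧ row + d.1 < n ∧ 0 ≤ col + d.2 ∧ col + d.2 < m then
          pvStepA (fun q => pvCell g' q.1 q.2) s (row + d.1, col + d.2)
        else s) s := by
  intro offs
  induction offs with
  | nil => intro s; rfl
  | cons d offs ih =>
    intro s
    simp only [List.filterMap_cons, List.foldl_cons]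
    split_ifs with hb
    · simp only [List.foldl_cons]; exact ih _
    · exact ih _

theorem pvScanA_eq (g' : List (List Int)) (row col n m : Int)
    (hn : (g'.length : Int) = n) (hm : ((pvRow g' row).length : Int) = m) :
    pvScanA g' row col
      = (pvCandsB n m row col).foldl (pvStepA (fun q => pvCell g' q.1 q.2)) (0, none, none) := by
  subst hn hm
  unfold pvScanA pvCandsB
  rw [pvFoldA_filterMap]
  apply List.foldl_ext
  intro s d hd
  simp only [pvStepA, ge_iff_le]
theorem pvZero_length (g : List (List Int)) (r c : Int) :
    (pvZero g r c).length = g.length := by simp [pvZero]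

theorem pvRow_pvZero_length (g : List (List Int)) (row col : Int) (hrow : 0 ≤ row) (i : Int)
    (hi : 0 ≤ i) : (pvRow (pvZero g row col) i).length = (pvRow g i).length := by
  unfold pvRow pvZero
  rw [PySem.List.pyGet?_of_nonneg _ hi, PySem.List.pyGet?_of_nonneg _ hi]
  by_cases h : i.toNat = row.toNat
  · rw [h]
    by_cases hlt : row.toNat < g.length
    · rw [List.getElem?_set_self hlt]
      unfold pvRow
      rw [PySem.List.pyGet?_of_nonneg _ hrow, List.getElem?_eq_getElem hlt]
      simp
    · rw [List.set_eq_of_length_le (by omega)]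
  · rw [List.getElem?_set_ne (by omega)]

theorem pvCell_pvZero (g : List (List Int)) (row col r c : Int)
    (hrow : 0 ≤ row) (hcol : 0 ≤ col) (hr : 0 ≤ r) (hc : 0 ≤ c)
    (hne : ¬(r = row ∧ c = col)) :
    pvCell (pvZero g row col) r c = pvCell g r c := by
  unfold pvCell
  unfold pvRow pvZero
  rw [PySem.List.pyGet?_of_nonneg _ hr, PySem.List.pyGet?_of_nonneg _ hr]
  by_cases h : r.toNat = row.toNat
  · have hcc : c ≠ col := fun hcc => hne ⟨by omega, hcc⟩
    rw [h]
    by_cases hlt : row.toNat < g.length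
    · rw [List.getElem?_set_self hlt]
      unfold pvRow
      rw [PySem.List.pyGet?_of_nonneg _ hrow, List.getElem?_eq_getElem hlt]
      simp only [Option.getD_some]
      rw [PySem.List.pyGet?_of_nonneg _ hc, PySem.List.pyGet?_of_nonneg _ hc]
      rw [List.getElem?_set_ne (by omega)]
    · rw [List.set_eq_of_length_le (by omega)]
  · rw [List.getElem?_set_ne (by omega)]

theorem pvCell_pvZero_self (g : List (List Int)) (row col : Int)
    (hrow : 0 ≤ row) (hcol : 0 ≤ col)
    (hr : row < (g.length : Int)) (hc : col < ((pvRow g row).length : Int)) :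
    pvCell (pvZero g row col) row col = 0 := by
  unfold pvCell pvRow pvZero
  rw [PySem.List.pyGet?_of_nonneg _ hrow]
  rw [List.getElem?_set_self (by omega)]
  simp only [Option.getD_some]
  rw [PySem.List.pyGet?_of_nonneg _ hcol]
  have hlen : ((pvRow g row).set col.toNat 0).length = (pvRow g row).length := by simp
  rw [List.getElem?_set_self (by omega)]
  simp
-- one unfolding step of the while loop, and the `pos is None` exit
theorem pvWalkB_succ (g : List (List Int)) (n m : Int) (fuel : Nat)
    (V : PySem.Set (Int × Int)) (p : Int × Int) (total : Int) :
    pvWalkB g n m (fuel + 1) V (some p) total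
      = pvWalkB g n m fuel (PySem.Set.add V p)
          (pvPick (pvCandsB n m p.1 p.2)
            (fun q => if PySem.Set.contains (PySem.Set.add V p) q then 0 else pvCellB g q))
          (total + pvCellB g p) := rfl

theorem pvWalkB_none (g : List (List Int)) (n m : Int) (fuel : Nat)
    (V : PySem.Set (Int × Int)) (total : Int) :
    pvWalkB g n m fuel V none total = total := by cases fuel <;> rfl

theorem pvContains_add_ne (V : PySem.Set (Int × Int)) (x q : Int × Int) (h : q ≠ x) :
    PySem.Set.contains (PySem.Set.add V x) q = PySem.Set.contains V q := by
  cases hc : PySem.Set.contains V q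
  · cases hc' : PySem.Set.contains (PySem.Set.add V x) q
    · rfl
    · have hm := (PySem.Set.contains_iff _ _).1 hc'
      rw [PySem.Set.mem_add] at hm
      rcases hm with hm | hm
      · rw [(PySem.Set.contains_iff _ _).2 hm] at hc; exact hc
      · exact absurd hm h
  · rw [(PySem.Set.contains_iff _ _).2 ?_]
    rw [PySem.Set.mem_add]
    exact Or.inl ((PySem.Set.contains_iff _ _).1 hc)

-- the main walk/recursion correspondence
theorem pvWalk_eq (g : List (List Int)) (m0 : Nat) :
    ∀ (fuel : Nat) (g' : List (List Int)) (V : PySem.Set (Int × Int)) (row col total : Int),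
    g'.length = g.length →
    (∀ i : Int, 0 ≤ i → (pvRow g' i).length = (pvRow g i).length) →
    (∀ i : Int, 0 ≤ i → i < (g.length : Int) → ((pvRow g i).length : Int) = (m0 : Int)) →
    (∀ r c : Int, 0 ≤ r → 0 ≤ c →
      pvCell g' r c = (if PySem.Set.contains V (r, c) then 0 else pvCellB g (r, c))) →
    0 ≤ row → row < (g.length : Int) → 0 ≤ col → col < (m0 : Int) →
    PySem.Set.contains V (row, col) = false →
    pvWalkB g (g.length : Int) (m0 : Int) fuel V (some (row, col)) total
      = total + hungry_rabbit_util fuel g' row col := by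
  intro fuel
  induction fuel with
  | zero =>
    intro g' V row col total _ _ _ _ _ _ _ _ _
    rw [hungry_rabbit_util, pvWalkB]
    omega
  | succ fuel ih =>
    intro g' V row col total hlen hrows hm hcell hr0 hrn hc0 hcm hV
    have hrowlen : ((pvRow g' row).length : Int) = (m0 : Int) := by
      rw [hrows row hr0]; exact hm row hr0 hrn
    have hscan := pvScanA_eq g' row col (g.length : Int) (m0 : Int)
      (by exact_mod_cast congrArg Nat.cast hlen) hrowlen
    have hcong : ∀ q ∈ pvCandsB (g.length : Int) (m0 : Int) row col,
        pvCell g' q.1 q.2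
          = (if PySem.Set.contains (PySem.Set.add V (row, col)) q then 0 else pvCellB g q) := by
      intro q hq
      obtain ⟨h1, h2, h3, h4, h5⟩ := pvCandsB_mem _ _ _ _ q hq
      have hc := hcell q.1 q.2 h1 h3
      rw [Prod.mk.eta] at hc
      rw [hc, pvContains_add_ne V (row, col) q h5]
    rw [pvFold_congr _ _ _ _ hcong] at hscan
    obtain ⟨hnone, hsome⟩ := pvPick_char
      (fun q => if PySem.Set.contains (PySem.Set.add V (row, col)) q then 0 else pvCellB g q)
      (pvCandsB (g.length : Int) (m0 : Int) row col)
    have hcar : pvCell g' row col = pvCellB g (row, col) := by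
      rw [hcell row col hr0 hc0, hV]; rfl
    rw [pvWalkB_succ]
    cases hpk : pvPick (pvCandsB (g.length : Int) (m0 : Int) row col)
        (fun q => if PySem.Set.contains (PySem.Set.add V (row, col)) q then 0 else pvCellB g q) with
    | none =>
      have h2 := hnone hpk
      rw [← hscan] at h2
      rw [pvWalkB_none]
      simp only [hungry_rabbit_util]
      rw [if_neg (by rw [h2]; simp)]
      rw [hcar]
    | some q =>
      obtain ⟨hfold, hpos, hmemq⟩ := hsome q hpk
      rw [← hscan] at hfold
      obtain ⟨hq1, hq2, hq3, hq4, hq5⟩ := pvCandsB_mem _ _ _ _ q hmemq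
      have hVq : PySem.Set.contains (PySem.Set.add V (row, col)) q = false := by
        cases hcq : PySem.Set.contains (PySem.Set.add V (row, col)) q
        · rfl
        · simp only [hcq, if_true] at hpos; omega
      have hg'row : row < (g'.length : Int) := by rw [hlen]; exact hrn
      have hg'col : col < ((pvRow g' row).length : Int) := by omega
      have hlen'' : (pvZero g' row col).length = g.length := by
        rw [pvZero_length]; exact hlen
      have hrows'' : ∀ i : Int, 0 ≤ i →
          (pvRow (pvZero g' row col) i).length = (pvRow g i).length := by
        intro i hi
        rw [pvRow_pvZero_length g' row col hr0 i hi]; exact hrows i hi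
      have hcell'' : ∀ r c : Int, 0 ≤ r → 0 ≤ c →
          pvCell (pvZero g' row col) r c
            = (if PySem.Set.contains (PySem.Set.add V (row, col)) (r, c) then 0
               else pvCellB g (r, c)) := by
        intro r c hr hc
        by_cases hrc : r = row ∧ c = col
        · obtain ⟨hr', hc'⟩ := hrc; rw [hr', hc']
          rw [pvCell_pvZero_self g' row col hr0 hc0 hg'row hg'col]
          rw [(PySem.Set.contains_iff _ _).2 (by rw [PySem.Set.mem_add]; exact Or.inr rfl)]
          rfl
        · rw [pvCell_pvZero g' row col r c hr0 hc0 hr hc hrc]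
          rw [hcell r c hr hc]
          rw [pvContains_add_ne V (row, col) (r, c) (by
            intro he; rw [Prod.ext_iff] at he; exact hrc ⟨he.1, he.2⟩)]
      have hih := ih (pvZero g' row col) (PySem.Set.add V (row, col)) q.1 q.2
        (total + pvCellB g (row, col)) hlen'' hrows'' hm hcell'' hq1 hq2 hq3 hq4
        (by rw [Prod.mk.eta]; exact hVq)
      rw [Prod.mk.eta] at hih
      rw [hih]
      simp only [hungry_rabbit_util]
      rw [if_pos (by rw [hfold]; exact ⟨hpos, by simp, by simp⟩)]
      rw [hfold]
      simp only [Option.getD_some]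
      rw [hcar]
      ring

theorem pvRow_zero (g : List (List Int)) : pvRow g 0 = g.headI := by
  unfold pvRow
  rw [PySem.List.pyGet?_of_nonneg _ (le_refl 0)]
  cases g <;> rfl

-- nested centre scan as a flat fold over the candidate product
theorem pvNested_flat (g : List (List Int)) (cols : List Int) :
    ∀ (rows : List Int) (s : Int × Option Int × Option Int),
    rows.foldl (fun s r => cols.foldl (fun s c =>
        if pvCell g r c > s.1 then (pvCell g r c, some r, some c) else s) s) s
      = (rows.flatMap (fun r => cols.map (fun c => (r, c)))).foldl
          (pvStepA (fun q => pvCell g q.1 q.2)) s := by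
  intro rows
  induction rows with
  | nil => intro s; rfl
  | cons r rows ih =>
    intro s
    simp only [List.foldl_cons, List.flatMap_cons, List.foldl_append]
    rw [← ih]
    congr 1
    rw [List.foldl_map]
    apply List.foldl_ext
    intro a c _
    simp [pvStepA]

theorem pvFold_dup (f : Int × Int → Int) (L : List (Int × Int)) :
    (L ++ L).foldl (pvStepA f) ((0 : Int), (none : Option Int), (none : Option Int))
      = L.foldl (pvStepA f) (0, none, none) := by
  rw [List.foldl_append]
  obtain ⟨h1, -, -⟩ := pvFoldA_char f L 0 (none, none)
  apply pvFold_noop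
  intro q hq
  have hle := (PySem.List.le_foldl_max (L.map f) 0).2 (f q) (List.mem_map_of_mem hq)
  rw [h1]
  exact hle

-- common tail of the centre comparison: fold over PA equals fold over PB,
-- all PB candidates are in bounds, conclude both components of the claim
theorem pvCenter_finish (g : List (List Int)) (PA PB : List (Int × Int))
    (hAB : PA.foldl (pvStepA (fun q => pvCell g q.1 q.2)) (0, none, none)
         = PB.foldl (pvStepA (fun q => pvCell g q.1 q.2)) (0, none, none))
    (hb : ∀ q ∈ PB, 0 ≤ q.1 ∧ q.1 < (g.length : Int) ∧ 0 ≤ q.2 ∧ q.2 < ((g.headI).length : Int)) :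
    ((PA.foldl (pvStepA (fun q => pvCell g q.1 q.2)) (0, none, none)).2.1,
     (PA.foldl (pvStepA (fun q => pvCell g q.1 q.2)) (0, none, none)).2.2)
      = ((pvPick PB (pvCellB g)).map Prod.fst, (pvPick PB (pvCellB g)).map Prod.snd)
    ∧ ∀ p, pvPick PB (pvCellB g) = some p →
        0 ≤ p.1 ∧ p.1 < (g.length : Int) ∧ 0 ≤ p.2 ∧ p.2 < ((g.headI).length : Int) := by
  rw [hAB, pvFold_congr _ _ _ _ (fun q hq => by
    obtain ⟨h1, _, h3, _⟩ := hb q hq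
    rw [pvCellB_eq_pvCell g q.1 q.2 h1 h3, Prod.mk.eta])]
  obtain ⟨hnone, hsome⟩ := pvPick_char (pvCellB g) PB
  cases hpk : pvPick PB (pvCellB g) with
  | none =>
    have h2 := hnone hpk
    refine ⟨?_, fun p hp => absurd hp (by simp)⟩
    rw [Prod.ext_iff]
    constructor
    · show _ = none; rw [h2]
    · show _ = none; rw [h2]
  | some q =>
    obtain ⟨hfold, hpos, hmem⟩ := hsome q hpk
    refine ⟨by simp [hfold], fun p hp => ?_⟩
    rw [Option.some_inj] at hp
    subst hp
    exact hb q hmem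

-- find_center vs pvStart
theorem pvCenter_rel (g : List (List Int)) (hn : g.length ≠ 0) (hm : (g.headI).length ≠ 0)
    (_hrect : ∀ r ∈ g, r.length = (g.headI).length) :
    find_center g = ((pvStart g).map Prod.fst, (pvStart g).map Prod.snd)
    ∧ ∀ p, pvStart g = some p →
        0 ≤ p.1 ∧ p.1 < (g.length : Int) ∧ 0 ≤ p.2 ∧ p.2 < ((g.headI).length : Int) := by
  simp only [find_center, pvStart, pvRow_zero]
  have e1 : PySem.Int.mod (g.length : Int) 2 = ((g.length % 2 : Nat) : Int) := by
    exact_mod_cast PySem.Int.mod_natCast g.length 2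
  have e2 : PySem.Int.mod ((g.headI).length : Int) 2 = (((g.headI).length % 2 : Nat) : Int) := by
    exact_mod_cast PySem.Int.mod_natCast (g.headI).length 2
  have e3 : PySem.Int.floordiv (g.length : Int) 2 = ((g.length / 2 : Nat) : Int) := by
    exact_mod_cast PySem.Int.floordiv_natCast g.length 2
  have e4 : PySem.Int.floordiv ((g.headI).length : Int) 2 = (((g.headI).length / 2 : Nat) : Int) := by
    exact_mod_cast PySem.Int.floordiv_natCast (g.headI).length 2
  rw [e1, e2, e3, e4]
  simp only [Nat.cast_eq_zero]
  by_cases hpn : g.length % 2 = 0 <;> by_cases hpm : (g.headI).length % 2 = 0 <;>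
      [(rw [if_pos hpn, if_pos hpm, if_pos hpn, if_pos hpm]);
       (rw [if_pos hpn, if_neg hpm, if_pos hpn, if_neg hpm]);
       (rw [if_neg hpn, if_pos hpm, if_neg hpn, if_pos hpm]);
       (rw [if_neg hpn, if_neg hpm, if_neg hpn, if_neg hpm])] <;>
    rw [pvNested_flat] <;>
    simp only [List.flatMap_cons, List.flatMap_nil, List.map_cons, List.map_nil,
      List.append_nil, List.cons_append, List.nil_append]
  · exact pvCenter_finish g _ _ rfl (by
      intro q hq
      simp only [List.mem_cons, List.not_mem_nil, or_false] at hq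
      rcases hq with rfl | rfl | rfl | rfl <;> refine ⟨?_, ?_, ?_, ?_⟩ <;> simp <;> omega)
  · exact pvCenter_finish g _ _
      (by simp only [List.foldl_cons, List.foldl_nil, pvStepA_idem])
      (by
        intro q hq
        simp only [List.mem_cons, List.not_mem_nil, or_false] at hq
        rcases hq with rfl | rfl <;> refine ⟨?_, ?_, ?_, ?_⟩ <;> simp <;> omega)
  · exact pvCenter_finish g _ _
      (pvFold_dup (fun q => pvCell g q.1 q.2)
        [(((g.length / 2 : Nat) : Int), (((g.headI).length / 2 : Nat) : Int) - 1),
         (((g.length / 2 : Nat) : Int), (((g.headI).length / 2 : Nat) : Int))])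
      (by
        intro q hq
        simp only [List.mem_cons, List.not_mem_nil, or_false] at hq
        rcases hq with rfl | rfl <;> refine ⟨?_, ?_, ?_, ?_⟩ <;> simp <;> omega)
  · exact pvCenter_finish g _ _
      (by simp only [List.foldl_cons, List.foldl_nil, pvStepA_idem])
      (by
        intro q hq
        simp only [List.mem_cons, List.not_mem_nil, or_false] at hq
        rcases hq with rfl; refine ⟨?_, ?_, ?_, ?_⟩ <;> simp <;> omega)

theorem pvFuel_aux (m0 : Nat) : ∀ (g : List (List Int)), (∀ r ∈ g, r.length = m0) →
    ∀ a : Nat, g.foldl (fun a r => a + r.length) a = a + g.length * m0 := by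
  intro g
  induction g with
  | nil => intro _ a; simp
  | cons h t ih =>
    intro hr a
    simp only [List.foldl_cons, List.length_cons]
    rw [ih (fun r hm => hr r (List.mem_cons_of_mem h hm)), hr h List.mem_cons_self]
    ring

theorem pvFuel_eq (g : List (List Int)) (m0 : Nat) (hrect : ∀ r ∈ g, r.length = m0) :
    pvFuel g = g.length * m0 + 2 := by
  unfold pvFuel
  rw [pvFuel_aux m0 g hrect 0]
  ring
theorem pv_ports_eq (garden : List (List Int)) (hpre : Pre_hungry_rabbit garden) :
    hungry_rabbit garden = hungry_rabbit_alt garden := by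
  by_cases hg : garden.length = 0 ∨ (garden.headI).length = 0
  · simp only [hungry_rabbit, hungry_rabbit_alt, pvRow_zero]
    rw [if_pos hg, if_pos hg]
  · have hn : garden.length ≠ 0 := fun h => hg (Or.inl h)
    have hmh : (garden.headI).length ≠ 0 := fun h => hg (Or.inr h)
    have hrect : ∀ r ∈ garden, r.length = (garden.headI).length := by
      rcases hpre with h | h | h
      · exact absurd h hn
      · exact absurd h hmh
      · exact h
    simp only [hungry_rabbit, hungry_rabbit_alt, pvRow_zero]
    rw [if_neg hg, if_neg hg]
    simp only [List.map_id']
    obtain ⟨hc, hbnd⟩ := pvCenter_rel garden hn hmh hrect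
    rw [hc]
    cases hps : pvStart garden with
    | none =>
      simp only [Option.map_none]
      rw [if_pos (Or.inl trivial)]
      exact (pvWalkB_none _ _ _ _ _ _).symm
    | some p =>
      simp only [Option.map_some]
      rw [if_neg (by simp)]
      obtain ⟨hp1, hp2, hp3, hp4⟩ := hbnd p hps
      simp only [Option.getD_some]
      rw [pvFuel_eq garden (garden.headI).length hrect]
      have hmlen : ∀ i : Int, 0 ≤ i → i < (garden.length : Int) →
          ((pvRow garden i).length : Int) = (((garden.headI).length : Nat) : Int) := by
        intro i h0 hlt
        unfold pvRow
        rw [PySem.List.pyGet?_of_nonneg _ h0]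
        have hi : i.toNat < garden.length := by omega
        rw [List.getElem?_eq_getElem hi]
        simp only [Option.getD_some]
        exact_mod_cast congrArg Nat.cast (hrect _ (List.getElem_mem hi))
      have hwalk := pvWalk_eq garden ((garden.headI).length)
        (garden.length * (garden.headI).length + 2) garden (PySem.Set.ofList []) p.1 p.2 0
        rfl (fun i _ => rfl) hmlen
        (by
          intro r c hr hc
          rw [show PySem.Set.contains (PySem.Set.ofList ([] : List (Int × Int))) (r, c) = false
            from rfl]
          simp only [Bool.false_eq_true, if_false]
          exact pvCellB_eq_pvCell garden r c hr hc)
        hp1 hp2 hp3 hp4 rfl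
      rw [Prod.mk.eta] at hwalk
      simp only [pvFuelB]
      rw [hwalk]
      omega

-- ===== VERDICT (by name: the statement is the Claim_ definition above) =====
theorem hungry_rabbit_spec : Claim_equal_hungry_rabbit := by
  intro garden _ hpre
  unfold Spec_hungry_rabbit
  exact pv_ports_eq garden hpre
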